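-- pv_equiv track=rewrite | github.com/Shoestick/10X-Detector | test_ground.py | line_is_valid
-- ===== SOURCE A (Python) =====
-- def line_is_valid(codeline):
--     j = 0 # will be pos in string of first none space character
--     # to see if the line contains anything
--     if codeline == "":
--         return False
--     # to see if the line is longer than 2 none space characters
--     # also to see if line has any none space characters
--     else:
--         for i in range(len(codeline)):
--             if codeline[i] != " ":
--                 if i + 3 > len(codeline):
--                     return False
--                 else:
--                     j = i
--                     break
--             elif i + 3 > len(codeline):
--                 return False
--     # check to see if the line is a single line comment
--     if codeline[j] == "#" or (codeline[j] == "/" and codeline[j + 1] == "/"):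
--         return False
--     # check for multiline comments
--     # check to see if the line is boilerplate
--     # otherwise it's good
--     return True
-- ===== SOURCE B (Python) =====
-- def line_is_valid(codeline):
--     s = codeline.lstrip(" ")
--     return len(s) >= 3 and s[0] != "#" and not s.startswith("//")
-- ===== Notes on version B (the rewrite author's own statement) =====
-- stated objective: simpler
-- what changed: Replaces A's dual-purpose index scan (finding the first non-space while checking i+3>len at every step) with a one-line decomposition: strip leading spaces once, then test length >= 3 and the two comment prefixes on the remainder.
import Mathlib
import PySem

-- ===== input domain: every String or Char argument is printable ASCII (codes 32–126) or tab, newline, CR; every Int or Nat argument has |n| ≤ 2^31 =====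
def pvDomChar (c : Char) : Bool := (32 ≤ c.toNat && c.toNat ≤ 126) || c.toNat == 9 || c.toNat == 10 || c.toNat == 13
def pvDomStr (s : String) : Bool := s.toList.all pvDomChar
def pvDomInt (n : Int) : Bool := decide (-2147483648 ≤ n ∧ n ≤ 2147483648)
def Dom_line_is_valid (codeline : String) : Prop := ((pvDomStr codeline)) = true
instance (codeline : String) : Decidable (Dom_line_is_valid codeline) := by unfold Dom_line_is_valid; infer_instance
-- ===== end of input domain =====

-- B replaces A's index-scan loop by a strip-once decomposition (objective: simpler); return values proved equal on all strings.

-- ===== PORT A =====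
-- result of A's for-loop: early `return False`, `break` with j = i, or normal fall-through
inductive ScanRes
  | retFalse
  | brkAt (j : Nat)
  | fallthrough
deriving DecidableEq

-- A's `for i in range(len(codeline))` loop, step for step
def scanA (cs : List Char) (i : Nat) : ScanRes :=
  if h : i < cs.length then
    if cs[i] ≠ ' ' then
      if i + 3 > cs.length then .retFalse else .brkAt i
    else if i + 3 > cs.length then .retFalse
    else scanA cs (i + 1)
  else .fallthrough
termination_by cs.length - i

def line_is_valid (codeline : String) : Bool :=
  let cs := codeline.toList
  if cs = [] then false
  else
    match scanA cs 0 with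
    | .retFalse => false
    | r =>
      -- j = 0 unless the loop broke at i (fall-through is unreachable on nonempty input)
      let j : Nat := match r with | .brkAt i => i | _ => 0
      -- indices j, j+1 are in range whenever read (Python would raise otherwise; proven unreachable)
      if cs.getD j ' ' = '#' ∨ (cs.getD j ' ' = '/' ∧ cs.getD (j + 1) ' ' = '/') then false
      else true

-- ===== PORT B =====
def line_is_valid_alt (codeline : String) : Bool :=
  -- s = codeline.lstrip(" ")  — strips only the space character
  let s := codeline.toList.dropWhile (fun c => c == ' ')
  decide (3 ≤ s.length) && (s.headD ' ' != '#') && !(s.take 2 == ['/', '/'])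

-- ===== PRECONDITION & SPEC =====
def Spec_line_is_valid (codeline : String) (out : Bool) : Prop := out = line_is_valid_alt codeline
instance (codeline : String) (out : Bool) : Decidable (Spec_line_is_valid codeline out) := by unfold Spec_line_is_valid; infer_instance

-- ===== CLAIM (what is proved, stated in full; the proofs are below) =====
def Claim_equal_line_is_valid : Prop := ∀ (codeline : String), Dom_line_is_valid codeline → Spec_line_is_valid codeline (line_is_valid codeline)

-- ===== LEMMAS AND PROOFS =====

-- characterisation of A's loop: on the suffix from i, all-spaces-or-short ⇒ retFalse,
-- otherwise break at the first non-space position cs.length - t.length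
theorem scanA_char (cs : List Char) (i : Nat) :
    scanA cs i =
      (if cs.length ≤ i then ScanRes.fallthrough
       else
         let t := (cs.drop i).dropWhile (fun c => c == ' ')
         if t.length < 3 then ScanRes.retFalse
         else ScanRes.brkAt (cs.length - t.length)) := by
  induction i using scanA.induct cs with
  | case1 i h hne hgt =>
    rw [scanA, dif_pos h, if_pos hne, if_pos hgt]
    have hd : List.drop i cs = cs[i] :: List.drop (i + 1) cs := List.drop_eq_getElem_cons h
    have hne' : (cs[i] == ' ') = false := by simpa using hne
    simp only [if_neg (not_le.mpr h), hd, List.dropWhile_cons, hne', Bool.false_eq_true,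
      if_false, List.length_cons, List.length_drop]
    rw [if_pos (by omega)]
  | case2 i h hne hle =>
    rw [scanA, dif_pos h, if_pos hne, if_neg hle]
    have hd : List.drop i cs = cs[i] :: List.drop (i + 1) cs := List.drop_eq_getElem_cons h
    have hne' : (cs[i] == ' ') = false := by simpa using hne
    simp only [if_neg (not_le.mpr h), hd, List.dropWhile_cons, hne', Bool.false_eq_true,
      if_false, List.length_cons, List.length_drop]
    rw [if_neg (by omega)]
    congr 1
    omega
  | case3 i h hsp hgt =>
    rw [scanA, dif_pos h, if_neg hsp, if_pos hgt]
    have hd : List.drop i cs = cs[i] :: List.drop (i + 1) cs := List.drop_eq_getElem_cons h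
    have hsp' : (cs[i] == ' ') = true := by simpa using not_not.mp hsp
    have hlen : ((List.drop (i + 1) cs).dropWhile (fun c => c == ' ')).length
        ≤ (List.drop (i + 1) cs).length := List.length_dropWhile_le _ _
    simp only [List.length_drop] at hlen
    simp only [if_neg (not_le.mpr h), hd, List.dropWhile_cons, hsp', if_pos]
    rw [if_pos (by omega)]
  | case4 i h hsp hle ih =>
    rw [scanA, dif_pos h, if_neg hsp, if_neg hle, ih]
    have hd : List.drop i cs = cs[i] :: List.drop (i + 1) cs := List.drop_eq_getElem_cons h
    have hsp' : (cs[i] == ' ') = true := by simpa using not_not.mp hsp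
    rw [if_neg (not_le.mpr (by omega : i + 1 < cs.length)), if_neg (not_le.mpr h), hd]
    simp only [List.dropWhile_cons, hsp', if_pos]
  | case5 i h =>
    rw [scanA, dif_neg h, if_pos (Nat.le_of_not_lt h)]


-- the strip prefix: cs = spaces ++ t, so indexing cs at cs.length - t.length reads t
theorem getD_after_strip (cs : List Char) (k : Nat) :
    cs.getD (cs.length - ((cs.dropWhile (fun c => c == ' ')).length) + k) ' ' =
      (cs.dropWhile (fun c => c == ' ')).getD k ' ' := by
  induction cs with
  | nil => simp
  | cons c cs ih =>
    by_cases h : (c == ' ') = true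
    · have hle : (cs.dropWhile (fun c => c == ' ')).length ≤ cs.length :=
        List.length_dropWhile_le _ _
      simp only [List.dropWhile_cons, h, if_pos, List.length_cons]
      have harith : cs.length + 1 - (cs.dropWhile (fun c => c == ' ')).length + k
           = (cs.length - (cs.dropWhile (fun c => c == ' ')).length + k) + 1 := by omega
      rw [harith]
      simpa using ih
    · rw [Bool.not_eq_true] at h
      simp only [List.dropWhile_cons, h, Bool.false_eq_true, if_false, List.length_cons]
      have harith : cs.length + 1 - (cs.length + 1) + k = k := by omega
      rw [harith]

theorem line_is_valid_eq (codeline : String) :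
    line_is_valid codeline = line_is_valid_alt codeline := by
  unfold line_is_valid line_is_valid_alt
  set cs := codeline.toList with hcs
  by_cases hnil : cs = []
  · simp [hnil]
  · have hpos : 0 < cs.length := List.length_pos_iff.mpr hnil
    simp only [hnil, if_neg, if_false]
    rw [scanA_char]
    rw [if_neg (by omega)]
    simp only [List.drop_zero]
    set t := cs.dropWhile (fun c => c == ' ') with ht
    by_cases hshort : t.length < 3
    · simp only [hshort, if_pos]
      have : ¬ (3 ≤ t.length) := by omega
      simp [this]
    · simp only [hshort, if_neg, if_false]
      have h3 : 3 ≤ t.length := by omega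
      have h0 : cs.getD (cs.length - t.length) ' ' = t.getD 0 ' ' := by
        simpa using getD_after_strip cs 0
      have h1 : cs.getD (cs.length - t.length + 1) ' ' = t.getD 1 ' ' := getD_after_strip cs 1
      simp only [h0, h1, decide_eq_true_eq]
      obtain ⟨a, b, c, rest, hT⟩ : ∃ a b c rest, t = a :: b :: c :: rest := by
        match t, h3 with
        | a :: b :: c :: rest, _ => exact ⟨a, b, c, rest, rfl⟩
      rw [hT]
      simp only [List.getD, List.getElem?_cons_zero, List.getElem?_cons_succ, Option.getD_some,
        List.headD_cons, List.take_succ_cons, List.take_zero, decide_true, if_pos,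
        List.length_cons]
      by_cases ha : a = '#'
      · simp [ha]
      · by_cases hab : a = '/' ∧ b = '/'
        · rw [hab.1, hab.2]; simp
        · have : ¬ (a = '#' ∨ a = '/' ∧ b = '/') := by tauto
          rw [if_neg this]
          have hcons : ([a, b] == ['/', '/']) = false := by
            apply beq_eq_false_iff_ne.mpr
            intro he
            injection he with e1 e2
            injection e2 with e2 _
            exact hab ⟨e1, e2⟩
          simp [hcons, ha]

-- ===== VERDICT (by name: the statement is the Claim_ definition above) =====
theorem line_is_valid_spec : Claim_equal_line_is_valid := by
  intro codeline _
  unfold Spec_line_is_valid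
  exact line_is_valid_eq codeline
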